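-- pv_equiv track=rewrite | github.com/junhyukM/algorithm_python | 프로그래머스/0/181834. l로 만들기/l로 만들기.py | solution
-- ===== SOURCE A (Python) =====
-- def solution(myString):
--     answer = ''
--     temp = 'abcdefghijklmnopqrstuvwxyz'
--     for i in myString:
--         if i in temp[:12]:
--             answer += 'l'
--         else:
--             answer += i
--     return answer
-- ===== SOURCE B (Python) =====
-- def solution(myString):
--     for c in 'abcdefghijkl':
--         myString = myString.replace(c, 'l')
--     return myString
-- ===== Notes on version B (the rewrite author's own statement) =====
-- stated objective: faster
-- what changed: Replaces A's single per-character accumulator loop (membership test in a slice, string concatenation per char) with twelve staged whole-string str.replace passes, one per target letter; correct because the replacement character is a fixed point of every later pass.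
import Mathlib
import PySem

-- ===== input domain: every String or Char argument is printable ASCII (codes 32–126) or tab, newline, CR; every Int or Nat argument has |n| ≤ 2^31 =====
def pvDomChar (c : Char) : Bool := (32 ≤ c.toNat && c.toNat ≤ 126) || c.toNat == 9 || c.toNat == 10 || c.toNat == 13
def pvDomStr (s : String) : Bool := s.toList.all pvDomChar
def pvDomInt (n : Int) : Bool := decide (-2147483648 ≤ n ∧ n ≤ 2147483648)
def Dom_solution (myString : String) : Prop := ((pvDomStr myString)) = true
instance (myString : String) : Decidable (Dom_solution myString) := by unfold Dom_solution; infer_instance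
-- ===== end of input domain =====

-- B replaces A's per-character accumulator loop with twelve staged whole-string
-- str.replace passes, one per target letter (objective: faster, constant-factor, measured).


-- ===== PORT A =====
-- answer = ''; temp = 'abc…z'; for i in myString: if i in temp[:12]: answer += 'l' else: answer += i
def solution (myString : String) : String :=
  let temp : List Char := "abcdefghijklmnopqrstuvwxyz".toList
  String.ofList <| myString.toList.foldl
    (fun answer i =>
      if (PySem.List.slice temp none (some 12)).contains i then answer ++ ['l']
      else answer ++ [i]) []

-- ===== PORT B =====
-- for c in 'abcdefghijkl': myString = myString.replace(c, 'l'); return myString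
def solution_alt (myString : String) : String :=
  "abcdefghijkl".toList.foldl
    (fun s c => PySem.Str.replace s (String.ofList [c]) "l") myString

-- ===== PRECONDITION & SPEC =====
def Spec_solution (myString : String) (out : String) : Prop := out = solution_alt myString
instance (myString : String) (out : String) : Decidable (Spec_solution myString out) := by unfold Spec_solution; infer_instance

-- ===== CLAIM (what is proved, stated in full; the proofs are below) =====
def Claim_equal_solution : Prop := ∀ (myString : String), Dom_solution myString → Spec_solution myString (solution myString)

-- ===== LEMMAS AND PROOFS =====

-- replacing a single character by a single character is a pointwise map
theorem pv_replace_go_single (c : Char) (l : List Char) (fuel : Nat) (acc : List Char)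
    (h : l.length ≤ fuel) :
    PySem.Chars.replace.go [c] ['l'] fuel l acc
      = acc.reverse ++ l.map (fun x => if x = c then 'l' else x) := by
  induction l generalizing fuel acc with
  | nil => cases fuel <;> simp [PySem.Chars.replace.go]
  | cons x xs ih =>
    cases fuel with
    | zero => simp at h
    | succ n =>
      simp only [PySem.Chars.replace.go]
      by_cases hx : x = c
      · have : ([c] : List Char).isPrefixOf (x :: xs) = true := by
          simp [List.isPrefixOf, hx]
        rw [if_pos this]
        have := ih n (['l'].reverse ++ acc) (by simpa using Nat.le_of_succ_le_succ h)
        simpa [hx] using this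
      · have : ([c] : List Char).isPrefixOf (x :: xs) = false := by
          simp [List.isPrefixOf, Ne.symm hx]
        rw [if_neg (by simp [this])]
        have := ih n (x :: acc) (by simpa using Nat.le_of_succ_le_succ h)
        simpa [hx] using this

theorem pv_replace_single (c : Char) (l : List Char) :
    PySem.Chars.replace l [c] ['l'] = l.map (fun x => if x = c then 'l' else x) := by
  rw [PySem.Chars.replace]
  simp only [List.isEmpty_cons, Bool.false_eq_true, if_false]
  simpa using pv_replace_go_single c l l.length [] le_rfl

-- folding the single-char replace passes over cs = one map; uses that 'l' is a
-- fixed point of every pass (the replacement char is 'l')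
theorem pv_fold_replace (cs : List Char) (l : List Char) :
    cs.foldl (fun s c => s.map (fun x => if x = c then 'l' else x)) l
      = l.map (fun x => if cs.contains x then 'l' else x) := by
  induction cs generalizing l with
  | nil => simp
  | cons c cs ih =>
    simp only [List.foldl_cons, ih, List.map_map]
    refine List.map_congr_left (fun x _ => ?_)
    by_cases hx : x = c
    · by_cases hl : cs.contains 'l' <;> simp [hx, Function.comp]
    · simp [Function.comp, hx]

-- A's accumulator loop is the same pointwise map
theorem pv_foldl_append (P : Char → Bool) (l : List Char) (acc : List Char) :
    l.foldl (fun a i => if P i then a ++ ['l'] else a ++ [i]) acc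
      = acc ++ l.map (fun c => if P c then 'l' else c) := by
  induction l generalizing acc with
  | nil => simp
  | cons x xs ih =>
    simp only [List.foldl_cons, List.map_cons, ih]
    by_cases h : P x <;> simp [h]

theorem pv_alt_toList (myString : String) :
    (solution_alt myString).toList
      = myString.toList.map (fun x => if ("abcdefghijkl".toList).contains x then 'l' else x) := by
  unfold solution_alt
  have key : ∀ (cs : List Char) (s : String),
      (cs.foldl (fun s c => PySem.Str.replace s (String.ofList [c]) "l") s).toList
        = cs.foldl (fun t c => t.map (fun x => if x = c then 'l' else x)) s.toList := by
    intro cs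
    induction cs with
    | nil => intro s; simp
    | cons c cs ih =>
      intro s
      simp only [List.foldl_cons, ih]
      congr 1
      rw [PySem.Str.toList_replace]
      simpa [String.toList_ofList] using pv_replace_single c s.toList
  rw [key, pv_fold_replace]

-- ===== VERDICT (by name: the statement is the Claim_ definition above) =====
theorem solution_spec : Claim_equal_solution := by
  intro s _
  unfold Spec_solution solution
  have hsl : PySem.List.slice "abcdefghijklmnopqrstuvwxyz".toList none (some 12)
      = "abcdefghijkl".toList := by decide
  apply String.toList_injective
  simp only [hsl, pv_alt_toList]
  rw [pv_foldl_append (fun i => ("abcdefghijkl".toList).contains i)]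
  simp [String.toList_ofList]
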